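-- pv_equiv track=rewrite | github.com/CHOSIYEON/Algorithms | KAKAO/Level 2/[3차] n진수 게임.py | solution
-- ===== SOURCE A (Python) =====
-- def convert(num, base):
--     tmp = '0123456789ABCDEF'
--     q, r = num // base, num % base
--     if q == 0:
--         return tmp[r]
--     else:
--         return convert(q, base) + tmp[r]
--
-- def solution(base, t, m, p):
--     answer = ''
--     numbers = ''
--     num = 0
--
--     while len(numbers) < t * m:
--         numbers += str(convert(num, base))
--         num += 1
--
--     for i in range(p - 1, t * m, m):
--         answer += numbers[i]
--
--     return answer
-- ===== SOURCE B (Python) =====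
-- def digits(num, base):
--     tmp = '0123456789ABCDEF'
--     if num == 0:
--         return '0'
--     ds = ''
--     while num != 0:
--         ds = tmp[num % base] + ds
--         num //= base
--     return ds
--
--
-- def solution(base, t, m, p):
--     limit = t * m          # total characters needed from the stream
--     answer = []
--     idx = 0                # running index into the infinite digit stream
--     target = p - 1         # next stream position to sample
--     num = 0
--     while idx < limit:
--         for d in digits(num, base):
--             if idx == target and idx < limit:
--                 answer.append(d)
--                 target += m
--             idx += 1
--         num += 1
--     return ''.join(answer)
-- ===== Notes on version B (the rewrite author's own statement) =====
-- stated objective: alternative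
-- what changed: B fuses generation and sampling into one streaming pass: it converts each number to its digits iteratively (loop with divmod instead of A's recursion), keeps a running global character index and a next-target position, and collects a digit exactly when the index hits the target, so the full base-n string is never materialised and the final indexing pass disappears.
-- outside the precondition, e.g. on solution(2, 1, 1, 0): A returns '00', B returns ''; on solution(1, 1, 1, 1): A returns '0', B returns '0'
import Mathlib
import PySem

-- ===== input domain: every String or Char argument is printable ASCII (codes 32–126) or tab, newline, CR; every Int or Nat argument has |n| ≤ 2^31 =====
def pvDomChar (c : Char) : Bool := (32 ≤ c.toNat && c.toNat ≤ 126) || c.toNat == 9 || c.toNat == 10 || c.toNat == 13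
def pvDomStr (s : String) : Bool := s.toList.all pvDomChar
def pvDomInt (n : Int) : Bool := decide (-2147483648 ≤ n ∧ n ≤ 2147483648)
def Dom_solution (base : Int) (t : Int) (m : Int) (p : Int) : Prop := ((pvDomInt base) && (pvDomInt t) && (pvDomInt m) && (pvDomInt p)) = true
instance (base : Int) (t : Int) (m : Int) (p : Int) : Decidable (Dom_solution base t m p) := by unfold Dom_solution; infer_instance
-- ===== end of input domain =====

-- B streams the base-n digits with a running index and a next-target counter instead of
-- building the whole base-n string and indexing into it afterwards (return value only).

-- shared constant: the digit table 'tmp' of both Pythons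
def tmpHex : List Char := ['0','1','2','3','4','5','6','7','8','9','A','B','C','D','E','F']
def hexAt (r : Int) : Char := (PySem.List.pyGet? tmpHex r).getD '?'

-- ===== PORT A =====
-- convert(num, base): recursion on the quotient; fuel num.toNat+1 suffices on the admitted inputs
def convertA (fuel : Nat) (num base : Int) : List Char :=
  match fuel with
  | 0 => []
  | f + 1 =>
    let q := PySem.Int.floordiv num base
    let r := PySem.Int.mod num base
    if q = 0 then [hexAt r] else convertA f q base ++ [hexAt r]

-- while len(numbers) < t*m: numbers += convert(num, base); num += 1
def buildA (fuel : Nat) (numbers : List Char) (num base tm : Int) : List Char :=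
  match fuel with
  | 0 => numbers
  | f + 1 =>
    if (numbers.length : Int) < tm then
      buildA f (numbers ++ convertA (num.toNat + 1) num base) (num + 1) base tm
    else numbers

def solution (base : Int) (t : Int) (m : Int) (p : Int) : String :=
  let tm := t * m
  let numbers := buildA (tm.toNat + 1) [] 0 base tm
  let answer := (PySem.List.pyRange (p - 1) tm m).foldl
      (fun acc i => acc ++ [(PySem.List.pyGet? numbers i).getD '?']) []
  String.mk answer

-- ===== PORT B =====
-- digits(num, base): iterative divmod loop building the digit list front-first
def digitsLoopB (fuel : Nat) (num base : Int) (ds : List Char) : List Char :=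
  match fuel with
  | 0 => ds
  | f + 1 =>
    if num = 0 then ds
    else digitsLoopB f (PySem.Int.floordiv num base) base
        (hexAt (PySem.Int.mod num base) :: ds)

def digitsB (num base : Int) : List Char :=
  if num = 0 then ['0'] else digitsLoopB (num.toNat + 1) num base []

-- the inner 'for d in digits(num, base): …' of B
def stepB (ds answer : List Char) (idx target tm mstep : Int) : List Char × Int × Int :=
  match ds with
  | [] => (answer, idx, target)
  | d :: rest =>
    if idx = target ∧ idx < tm then
      stepB rest (answer ++ [d]) (idx + 1) (target + mstep) tm mstep
    else
      stepB rest answer (idx + 1) target tm mstep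

-- while idx < limit: process one number's digits
def runB (fuel : Nat) (answer : List Char) (idx target num base tm mstep : Int) : List Char :=
  match fuel with
  | 0 => answer
  | f + 1 =>
    if idx < tm then
      let s := stepB (digitsB num base) answer idx target tm mstep
      runB f s.1 s.2.1 s.2.2 (num + 1) base tm mstep
    else answer

def solution_alt (base : Int) (t : Int) (m : Int) (p : Int) : String :=
  let limit := t * m
  String.mk (runB (limit.toNat + 1) [] 0 (p - 1) 0 base limit m)

-- ===== PRECONDITION & SPEC =====
-- Pre_ admits the inputs on which A returns its intended value: the problem's natural domain
-- (base ≥ 2, t ≥ 0, m ≥ 1, p ≥ 1, with base ≤ 16 unless t*m ≤ 16 keeps every generated number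
-- below the 16-character digit table) plus the degenerate region where t*m ≤ 0 and the sampling
-- range is empty, so A returns ''. Excluded although A sometimes still returns there:
-- p ≤ 0 with t*m ≥ 1, where the start index p-1 is negative and A's answer relies on accidental
-- Python negative-index wraparound (or raises IndexError); base ≤ 1 / negative bases (divergence or
-- ZeroDivisionError except for stray tiny cases); base ≥ 17 with t*m > 16 (IndexError); m = 0
-- (ValueError from range).
def Pre_solution (base : Int) (t : Int) (m : Int) (p : Int) : Prop :=
  (2 ≤ base ∧ 0 ≤ t ∧ 1 ≤ m ∧ 1 ≤ p ∧ (base ≤ 16 ∨ t * m ≤ 16))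
  ∨ (t * m ≤ 0 ∧ ((1 ≤ m ∧ t * m ≤ p - 1) ∨ (m ≤ -1 ∧ p - 1 ≤ t * m)))
instance (base : Int) (t : Int) (m : Int) (p : Int) : Decidable (Pre_solution base t m p) := by
  unfold Pre_solution; infer_instance

def pvWitness_solution : Int × Int × Int × Int := (2, 4, 2, 1)

def Spec_solution (base : Int) (t : Int) (m : Int) (p : Int) (out : String) : Prop :=
  out = solution_alt base t m p
instance (base : Int) (t : Int) (m : Int) (p : Int) (out : String) :
    Decidable (Spec_solution base t m p out) := by unfold Spec_solution; infer_instance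

-- ===== CLAIM (what is proved, stated in full; the proofs are below) =====
def Claim_equal_solution : Prop :=
  ∀ (base : Int) (t : Int) (m : Int) (p : Int),
    Dom_solution base t m p → Pre_solution base t m p →
      Spec_solution base t m p (solution base t m p)

-- ===== LEMMAS AND PROOFS =====

theorem convertA_ne_nil (f : Nat) (num base : Int) : convertA (f + 1) num base ≠ [] := by
  by_cases h : PySem.Int.floordiv num base = 0 <;> simp [convertA, h]

theorem floordiv_bounds (num base : Int) (hb : 2 ≤ base) (hn : 1 ≤ num) :
    0 ≤ PySem.Int.floordiv num base ∧ PySem.Int.floordiv num base < num := by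
  constructor
  · rw [PySem.Int.le_floordiv_iff_mul_le (by omega)]; omega
  · rw [PySem.Int.floordiv_lt_iff_lt_mul (by omega)]
    nlinarith

theorem digitsLoopB_zero (g : Nat) (base : Int) (ds : List Char) :
    digitsLoopB g 0 base ds = ds := by
  cases g <;> simp [digitsLoopB]

theorem digitsLoopB_eq_convertA :
    ∀ (f1 : Nat) (num base : Int) (acc : List Char) (f2 : Nat),
      2 ≤ base → 1 ≤ num → num < (f1 : Int) → num < (f2 : Int) →
      digitsLoopB f1 num base acc = convertA f2 num base ++ acc := by
  intro f1
  induction f1 with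
  | zero => intro num base acc f2 hb hn h1 _; exfalso; omega
  | succ g ih =>
    intro num base acc f2 hb hn h1 h2
    obtain ⟨g2, rfl⟩ : ∃ g2, f2 = g2 + 1 := ⟨f2 - 1, by omega⟩
    have hne : num ≠ 0 := by omega
    have hq := floordiv_bounds num base hb hn
    simp only [digitsLoopB, hne, if_false]
    by_cases hq0 : PySem.Int.floordiv num base = 0
    · rw [hq0, digitsLoopB_zero]
      simp only [convertA, hq0, if_true]
      simp
    · have h1' : PySem.Int.floordiv num base < (g : Int) := by omega
      have h2' : PySem.Int.floordiv num base < (g2 : Int) := by omega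
      rw [ih _ base _ g2 hb (by omega) h1' h2']
      simp only [convertA, hq0, if_false]
      simp

theorem digitsB_eq_convertA (num base : Int) (f2 : Nat)
    (hb : 2 ≤ base) (hn : 0 ≤ num) (hf : num < (f2 : Int)) :
    digitsB num base = convertA f2 num base := by
  by_cases h0 : num = 0
  · subst h0
    obtain ⟨g2, rfl⟩ : ∃ g2, f2 = g2 + 1 := ⟨f2 - 1, by omega⟩
    simp only [digitsB, if_true]
    have hq : PySem.Int.floordiv 0 base = 0 := by
      rw [PySem.Int.floordiv_eq_ediv_of_pos (by omega)]; simp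
    have hr : PySem.Int.mod 0 base = 0 := by
      rw [PySem.Int.mod_eq_emod_of_pos (by omega)]; simp
    simp only [convertA, hq, hr, if_true]
    decide
  · simp only [digitsB, h0, if_false]
    rw [digitsLoopB_eq_convertA (num.toNat + 1) num base [] f2 hb (by omega) (by omega) hf]
    simp

-- positive-step range: nil, cons, overshoot bound, split
theorem pyRange_pos_nil (a b s : Int) (hs : 0 < s) (h : b ≤ a) :
    PySem.List.pyRange a b s = [] := by
  rw [PySem.List.pyRange_of_pos a b hs]
  simp [show ¬ a < b by omega]

theorem pyRange_neg_nil (a b s : Int) (hs : s < 0) (h : a ≤ b) :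
    PySem.List.pyRange a b s = [] := by
  simp [PySem.List.pyRange, show ¬ s = 0 by omega, show ¬ (0:Int) < s by omega,
    show ¬ b < a by omega]

theorem pyRange_pos_cons (a b s : Int) (hs : 0 < s) (h : a < b) :
    PySem.List.pyRange a b s = a :: PySem.List.pyRange (a + s) b s := by
  rw [PySem.List.pyRange_of_pos a b hs, PySem.List.pyRange_of_pos (a + s) b hs]
  simp only [h, if_true]
  have hcount : (b - a + s - 1) / s = (if a + s < b then ((b - (a + s) + s - 1) / s).toNat else 0) + 1 := by
    by_cases hab : a + s < b
    · simp only [hab, if_true]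
      have he : b - a + s - 1 = (b - (a + s) + s - 1) + 1 * s := by ring
      rw [he, Int.add_mul_ediv_right _ _ (by omega)]
      have hnn : 0 ≤ (b - (a + s) + s - 1) / s := Int.ediv_nonneg (by omega) (by omega)
      omega
    · simp only [hab, if_false]
      have h1 : (1 : Int) ≤ (b - a + s - 1) / s := by
        rw [Int.le_ediv_iff_mul_le hs]; omega
      have h2 : (b - a + s - 1) / s < 2 := by
        rw [Int.ediv_lt_iff_lt_mul hs]; omega
      omega
  have htn : ((b - a + s - 1) / s).toNat
      = (if a + s < b then ((b - (a + s) + s - 1) / s).toNat else 0) + 1 := by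
    omega
  rw [htn, List.range_succ_eq_map]
  simp only [List.map_cons, List.map_map, Nat.cast_zero, mul_zero, add_zero]
  congr 1
  apply List.map_congr_left
  intro k _
  simp only [Function.comp_apply]
  push_cast
  ring

theorem pyRange_pos_overshoot (a b s : Int) (hs : 0 < s) :
    b ≤ a + s * ((PySem.List.pyRange a b s).length : Int) := by
  by_cases h : b ≤ a
  · rw [pyRange_pos_nil a b s hs h]; simpa using h
  · have hm : (b - a).toNat < (b - a).toNat + 1 := by omega
    -- strong induction on (b - a).toNat via an explicit bound
    suffices H : ∀ (k : Nat) (a : Int), (b - a).toNat ≤ k →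
        b ≤ a + s * ((PySem.List.pyRange a b s).length : Int) by
      exact H (b - a).toNat a le_rfl
    intro k
    induction k with
    | zero =>
      intro a ha
      have : b ≤ a := by omega
      rw [pyRange_pos_nil a b s hs this]; simpa using this
    | succ k ih =>
      intro a ha
      by_cases hab : a < b
      · rw [pyRange_pos_cons a b s hs hab]
        have := ih (a + s) (by omega)
        simp only [List.length_cons]
        push_cast
        push_cast at this
        linarith
      · rw [pyRange_pos_nil a b s hs (by omega)]; simp; omega

theorem pyRange_pos_split (s : Int) (hs : 0 < s) :
    ∀ (k : Nat) (a c b : Int), (c - a).toNat ≤ k → c ≤ b →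
      PySem.List.pyRange a b s
        = PySem.List.pyRange a c s
          ++ PySem.List.pyRange (a + s * ((PySem.List.pyRange a c s).length : Int)) b s := by
  intro k
  induction k with
  | zero =>
    intro a c b ha hcb
    rw [pyRange_pos_nil a c s hs (by omega)]
    simp
  | succ k ih =>
    intro a c b ha hcb
    by_cases hac : a < c
    · rw [pyRange_pos_cons a c s hs hac, pyRange_pos_cons a b s hs (by omega)]
      have := ih (a + s) c b (by omega) hcb
      rw [List.cons_append]
      congr 1
      rw [this]
      congr 2
      simp only [List.length_cons]
      push_cast
      ring
    · rw [pyRange_pos_nil a c s hs (by omega)]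
      simp

theorem stepB_spec (tm mstep : Int) (hm : 1 ≤ mstep) :
    ∀ (ds answer : List Char) (idx target : Int),
      0 ≤ idx → (idx ≤ target ∨ tm ≤ target) →
      stepB ds answer idx target tm mstep =
        (answer ++ (PySem.List.pyRange target (min tm (idx + ds.length)) mstep).map
            (fun i => ds.getD (i - idx).toNat '?'),
         idx + ds.length,
         target + mstep * ((PySem.List.pyRange target (min tm (idx + ds.length)) mstep).length : Int)) := by
  intro ds
  induction ds with
  | nil =>
    intro answer idx target hidx hinv
    have hempty : PySem.List.pyRange target (min tm (idx + (([] : List Char).length : Int))) mstep = [] := by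
      apply pyRange_pos_nil _ _ _ (by omega)
      simp only [List.length_nil, Nat.cast_zero, add_zero]
      omega
    rw [hempty]
    simp [stepB]
  | cons d rest ih =>
    intro answer idx target hidx hinv
    have hlen1 : (((d :: rest).length : Nat) : Int) = (rest.length : Int) + 1 := by
      simp only [List.length_cons]; push_cast; ring
    by_cases hc : idx = target ∧ idx < tm
    · obtain ⟨heq, hlt⟩ := hc
      subst heq
      have hmin : idx < min tm (idx + (((d :: rest).length : Nat) : Int)) := by omega
      rw [show stepB (d :: rest) answer idx idx tm mstep
            = stepB rest (answer ++ [d]) (idx + 1) (idx + mstep) tm mstep by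
          simp [stepB, hlt]]
      rw [ih (answer ++ [d]) (idx + 1) (idx + mstep) (by omega) (by left; omega)]
      have hmin2 : min tm (idx + 1 + (rest.length : Int))
          = min tm (idx + (((d :: rest).length : Nat) : Int)) := by omega
      set R1 := PySem.List.pyRange (idx + mstep) (min tm (idx + 1 + (rest.length : Int))) mstep with hR1
      have hcons : PySem.List.pyRange idx (min tm (idx + (((d :: rest).length : Nat) : Int))) mstep
          = idx :: R1 := by
        rw [pyRange_pos_cons idx _ mstep (by omega) hmin, ← hmin2, hR1]
      rw [hcons, List.map_cons]
      have hd : (d :: rest).getD (idx - idx).toNat '?' = d := by simp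
      rw [hd]
      have hmap : R1.map (fun i => rest.getD (i - (idx + 1)).toNat '?')
          = R1.map (fun i => (d :: rest).getD (i - idx).toNat '?') := by
        apply List.map_congr_left
        intro i hi
        rw [hR1] at hi
        have hib := (PySem.List.mem_pyRange_iff_of_pos (show (0:Int) < mstep by omega) i).mp hi
        have h2 : (i - idx).toNat = (i - (idx + 1)).toNat + 1 := by omega
        rw [h2, List.getD_cons_succ]
      rw [hmap]
      have h2 : idx + 1 + (rest.length : Int) = idx + (((d :: rest).length : Nat) : Int) := by omega
      have h3 : idx + mstep + mstep * ((R1.length : Nat) : Int)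
          = idx + mstep * ((((idx :: R1).length : Nat)) : Int) := by
        simp only [List.length_cons]; push_cast; ring
      rw [h2, h3]
      simp [List.append_assoc]
    · rw [show stepB (d :: rest) answer idx target tm mstep
            = stepB rest answer (idx + 1) target tm mstep by
          simp only [stepB]; rw [if_neg hc]]
      have hinv' : idx + 1 ≤ target ∨ tm ≤ target := by
        rcases hinv with h | h
        · by_cases he : idx = target
          · right; by_contra hno; exact hc ⟨he, by omega⟩
          · left; omega
        · right; exact h
      rw [ih answer (idx + 1) target (by omega) hinv']
      have hmin2 : min tm (idx + 1 + (rest.length : Int))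
          = min tm (idx + (((d :: rest).length : Nat) : Int)) := by omega
      have hmap : (PySem.List.pyRange target (min tm (idx + 1 + (rest.length : Int))) mstep).map
              (fun i => rest.getD (i - (idx + 1)).toNat '?')
            = (PySem.List.pyRange target (min tm (idx + (((d :: rest).length : Nat) : Int))) mstep).map
              (fun i => (d :: rest).getD (i - idx).toNat '?') := by
        rw [hmin2]
        by_cases htt : tm ≤ target
        · rw [pyRange_pos_nil _ _ _ (by omega) (by omega)]
          simp
        · have hit1 : idx + 1 ≤ target := by
            rcases hinv' with h | h
            · exact h
            · omega
          apply List.map_congr_left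
          intro i hi
          have hib := (PySem.List.mem_pyRange_iff_of_pos (show (0:Int) < mstep by omega) i).mp hi
          have h2 : (i - idx).toNat = (i - (idx + 1)).toNat + 1 := by omega
          rw [h2, List.getD_cons_succ]
      rw [hmap, hmin2]
      have h2 : idx + 1 + (rest.length : Int) = idx + (((d :: rest).length : Nat) : Int) := by omega
      rw [h2]

theorem buildA_prefix (base tm : Int) :
    ∀ (f : Nat) (numbers : List Char) (num : Int),
      ∃ suf, buildA f numbers num base tm = numbers ++ suf := by
  intro f
  induction f with
  | zero => intro numbers num; exact ⟨[], by simp [buildA]⟩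
  | succ g ih =>
    intro numbers num
    by_cases h : (numbers.length : Int) < tm
    · obtain ⟨suf, hs⟩ := ih (numbers ++ convertA (num.toNat + 1) num base) (num + 1)
      exact ⟨convertA (num.toNat + 1) num base ++ suf, by
        simp only [buildA, h, if_true]; rw [hs]; simp⟩
    · exact ⟨[], by simp [buildA, h]⟩

theorem run_eq (base tm mstep : Int) (hb : 2 ≤ base) (hm : 1 ≤ mstep) :
    ∀ (f : Nat) (num : Int) (numbers answer : List Char) (target : Int),
      0 ≤ num → 0 ≤ target →
      ((numbers.length : Int) ≤ target ∨ tm ≤ target) →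
      tm ≤ (numbers.length : Int) + f →
      runB f answer (numbers.length) target num base tm mstep
        = answer ++ (PySem.List.pyRange target tm mstep).map
            (fun i => (PySem.List.pyGet? (buildA f numbers num base tm) i).getD '?') := by
  intro f
  induction f with
  | zero =>
    intro num numbers answer target hnum htgt hinv hfuel
    have hempty : PySem.List.pyRange target tm mstep = [] := by
      apply pyRange_pos_nil _ _ _ (by omega)
      rcases hinv with h | h <;> omega
    rw [hempty]
    simp [runB, buildA]
  | succ g ih =>
    intro num numbers answer target hnum htgt hinv hfuel
    by_cases hlt : (numbers.length : Int) < tm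
    · -- loop body runs
      have hdig : digitsB num base = convertA (num.toNat + 1) num base :=
        digitsB_eq_convertA num base (num.toNat + 1) hb hnum (by omega)
      set c := convertA (num.toNat + 1) num base with hc
      have hcne : c ≠ [] := convertA_ne_nil num.toNat num base
      have hclen : 1 ≤ (c.length : Int) := by
        have hpos : 0 < c.length := List.length_pos_of_ne_nil hcne
        omega
      have hstep := stepB_spec tm mstep hm c answer (numbers.length) target
        (by omega) hinv
      have hrun : runB (g + 1) answer (numbers.length) target num base tm mstep
          = runB g (stepB c answer (numbers.length) target tm mstep).1
              (stepB c answer (numbers.length) target tm mstep).2.1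
              (stepB c answer (numbers.length) target tm mstep).2.2
              (num + 1) base tm mstep := by
        simp only [runB, hlt, if_true, hdig]
      rw [hrun, hstep]
      set s' := min tm ((numbers.length : Int) + (c.length : Int)) with hs'
      set L := (PySem.List.pyRange target s' mstep) with hL
      set target' := target + mstep * (L.length : Int) with htgt'
      have hbuild : buildA (g + 1) numbers num base tm
          = buildA g (numbers ++ c) (num + 1) base tm := by
        simp only [buildA, hlt, if_true, ← hc]
      have hlen' : (((numbers ++ c).length : Int)) = (numbers.length : Int) + (c.length : Int) := by
        push_cast [List.length_append]; ring
      have hover : s' ≤ target' := by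
        have := pyRange_pos_overshoot target s' mstep (by omega)
        omega
      have hinv' : (((numbers ++ c).length : Int) ≤ target' ∨ tm ≤ target') := by
        rw [hlen']
        by_cases h : tm ≤ (numbers.length : Int) + (c.length : Int)
        · right; omega
        · left; omega
      have htgt'0 : 0 ≤ target' := by
        have hLnn : 0 ≤ (L.length : Int) := by positivity
        nlinarith
      have hrec := ih (num + 1) (numbers ++ c)
        (answer ++ L.map (fun i => c.getD (i - (numbers.length : Int)).toNat '?'))
        target' (by omega) htgt'0 hinv' (by rw [hlen']; omega)
      rw [show ((numbers.length : Int) + (c.length : Int)) = (((numbers ++ c).length : Int)) from hlen'.symm]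
      rw [hrec, hbuild]
      rw [List.append_assoc]
      congr 1
      -- split the target range at s' / target'
      have hsplit := pyRange_pos_split mstep (by omega) (s' - target).toNat target s' tm le_rfl
        (by omega)
      rw [← hL] at hsplit
      rw [hsplit, List.map_append]
      congr 1
      · -- sampled from this chunk: c.getD (i - idx) = final-numbers lookup
        apply List.map_congr_left
        intro i hi
        by_cases htt : tm ≤ target
        · exfalso
          have : L = [] := pyRange_pos_nil _ _ _ (by omega) (by omega)
          rw [this] at hi; simp at hi
        · have hit : (numbers.length : Int) ≤ target := by
            rcases hinv with h | h; exact h; omega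
          have hib := (PySem.List.mem_pyRange_iff_of_pos (by omega : (0:Int) < mstep) i).mp hi
          have hi1 : (numbers.length : Int) ≤ i := by omega
          have hi2 : i < (numbers.length : Int) + (c.length : Int) := by omega
          obtain ⟨suf, hsuf⟩ := buildA_prefix base tm g (numbers ++ c) (num + 1)
          rw [hsuf, List.append_assoc]
          have hi0 : 0 ≤ i := by omega
          rw [PySem.List.pyGet?_of_nonneg _ hi0]
          have hidxeq : i.toNat = numbers.length + (i - (numbers.length : Int)).toNat := by omega
          rw [hidxeq]
          rw [List.getElem?_append_right (by omega)]
          have hk : numbers.length + (i - (numbers.length : Int)).toNat - numbers.length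
              = (i - (numbers.length : Int)).toNat := by omega
          rw [hk]
          have hklt : (i - (numbers.length : Int)).toNat < c.length := by omega
          rw [List.getElem?_append_left hklt]
          simp [List.getD_eq_getElem?_getD]
    · -- loop exits immediately
      have hti : tm ≤ target := by
        rcases hinv with h | h
        · omega
        · exact h
      have hempty : PySem.List.pyRange target tm mstep = [] :=
        pyRange_pos_nil _ _ _ (by omega) hti
      rw [hempty]
      simp [runB, buildA, hlt]

-- ===== VERDICT (by name: the statement is the Claim_ definition above) =====
theorem solution_spec : Claim_equal_solution := by
  intro base t m p _hdom hpre
  unfold Spec_solution solution solution_alt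
  dsimp only
  rcases hpre with ⟨hb2, ht, hm, hp, _⟩ | ⟨htm0, hcase⟩
  · have htm : 0 ≤ t * m := by positivity
    have hfold := PySem.List.foldl_append_eq_flatMap
      (fun i => [(PySem.List.pyGet? (buildA ((t * m).toNat + 1) [] 0 base (t * m)) i).getD '?'])
      (PySem.List.pyRange (p - 1) (t * m) m) []
    have hrun := run_eq base (t * m) m hb2 hm ((t * m).toNat + 1) 0 [] [] (p - 1)
      le_rfl (by omega) (by left; simp; omega) (by simp; omega)
    simp only [List.length_nil, Nat.cast_zero] at hrun
    rw [hfold, hrun]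
    have hflat : ∀ {α β : Type} (f : α → β) (l : List α),
        l.flatMap (fun i => [f i]) = l.map f := by
      intro α β f l
      induction l with
      | nil => rfl
      | cons x xs ih => simp [ih]
    rw [hflat]
  · -- degenerate region: t*m ≤ 0 and the sampling range is empty; both return ''
    have hrange : PySem.List.pyRange (p - 1) (t * m) m = [] := by
      rcases hcase with ⟨hm1, hpe⟩ | ⟨hm1, hpe⟩
      · exact pyRange_pos_nil _ _ _ (by omega) (by omega)
      · exact pyRange_neg_nil _ _ _ (by omega) (by omega)
    rw [hrange]
    have hf1 : (t * m).toNat + 1 = 1 := by omega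
    rw [hf1]
    have hrun1 : runB 1 [] 0 (p - 1) 0 base (t * m) m = [] := by
      simp [runB, show ¬ ((0:Int) < t * m) by omega]
    rw [hrun1]
    simp
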